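-- pv_equiv track=rewrite | github.com/derek-dkliu/pydsa | recursions/robot_grid.py | grid_robot_path
-- ===== SOURCE A (Python) =====
-- def grid_robot_path(grid):
--     n = len(grid)
--     m = len(grid[0])
--     dp = [[[]] * (m+1) for _ in range(n+1)]
--     for i in range(n-1, -1, -1):
--         for j in range(m-1, -1, -1):
--             if i == n-1 and j == m-1:
--                 dp[i][j] = [[(n-1,m-1)]]
--             elif grid[i][j] == 0:
--                 dp[i][j] = []
--             else:
--                 paths = []
--                 for path in dp[i+1][j]:
--                     paths.append([(i, j)] + path)
--                 for path in dp[i][j+1]: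
--                     paths.append([(i, j)] + path)
--                 dp[i][j] = paths
--     return dp[0][0]
-- ===== SOURCE B (Python) =====
-- def grid_robot_path(grid):
--     n = len(grid)
--     m = len(grid[0])
--
--     def dfs(i, j):
--         if i >= n or j >= m:
--             return []
--         if i == n - 1 and j == m - 1:
--             return [[(n - 1, m - 1)]]
--         if grid[i][j] == 0:
--             return []
--         return ([[(i, j)] + p for p in dfs(i + 1, j)]
--                 + [[(i, j)] + p for p in dfs(i, j + 1)])
--
--     return dfs(0, 0)
-- ===== Notes on version B (the rewrite author's own statement) =====
-- stated objective: simpler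
-- what changed: Replaces the (n+1)x(m+1) bottom-up DP table with a direct recursive dfs(i,j) over the grid (bounds check, then destination check, then zero-cell check), enumerating the same paths in the same order without building or mutating any table.
import Mathlib
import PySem

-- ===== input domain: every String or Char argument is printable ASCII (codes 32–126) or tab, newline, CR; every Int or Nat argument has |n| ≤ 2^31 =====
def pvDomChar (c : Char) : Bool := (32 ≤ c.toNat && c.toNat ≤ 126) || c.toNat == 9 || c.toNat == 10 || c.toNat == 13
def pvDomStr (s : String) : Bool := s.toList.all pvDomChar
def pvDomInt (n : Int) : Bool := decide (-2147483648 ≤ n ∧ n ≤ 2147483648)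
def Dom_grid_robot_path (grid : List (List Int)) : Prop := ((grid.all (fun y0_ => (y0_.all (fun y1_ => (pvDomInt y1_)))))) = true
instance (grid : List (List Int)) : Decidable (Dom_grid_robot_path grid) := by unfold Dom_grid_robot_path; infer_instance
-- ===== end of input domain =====

-- B replaces A's bottom-up (n+1)×(m+1) DP table with a direct recursive dfs over the grid (same return value; objective: simpler).

-- ===== PORT A =====
-- the dp table: dp[i][j] is a list of paths
abbrev PvTab := List (List (List (List (Int × Int))))

-- grid[i][j]; indices are in range under Pre_grid_robot_path
def pvGCell (grid : List (List Int)) (i j : Int) : Int :=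
  PySem.List.pyGetD (PySem.List.pyGetD grid i []) j 0

-- body of the inner 'for j in range(m-1, -1, -1)' loop of A
def pvInnerBody (grid : List (List Int)) (n m : Int) (i : Int) (dp : PvTab) (j : Int) : PvTab :=
  let v :=
    if i = n - 1 ∧ j = m - 1 then [[(n - 1, m - 1)]]
    else if pvGCell grid i j = 0 then []
    else
      -- paths = []; for path in dp[i+1][j]: paths.append([(i,j)] + path)
      let paths := (PySem.List.pyGetD (PySem.List.pyGetD dp (i + 1) []) j []).foldl
        (fun ps p => ps ++ [(i, j) :: p]) []
      -- for path in dp[i][j+1]: paths.append([(i,j)] + path)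
      let paths := (PySem.List.pyGetD (PySem.List.pyGetD dp i []) (j + 1) []).foldl
        (fun ps p => ps ++ [(i, j) :: p]) paths
      paths
  -- dp[i][j] = v   (i, j ≥ 0 in the loops)
  PySem.List.pySetD dp i (PySem.List.pySetD (PySem.List.pyGetD dp i []) j v)

-- body of the outer 'for i in range(n-1, -1, -1)' loop of A
def pvOuterBody (grid : List (List Int)) (n m : Int) (dp : PvTab) (i : Int) : PvTab :=
  (PySem.List.pyRange (m - 1) (-1) (-1)).foldl (pvInnerBody grid n m i) dp

def grid_robot_path (grid : List (List Int)) : List (List (Int × Int)) :=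
  let n : Int := grid.length
  let m : Int := (PySem.List.pyGetD grid 0 []).length   -- len(grid[0]); grid ≠ [] under Pre_
  -- dp = [[[]] * (m+1) for _ in range(n+1)]
  let dp : PvTab := (PySem.List.pyRange 0 (n + 1) 1).map
    (fun _ => List.replicate (m + 1).toNat ([] : List (List (Int × Int))))
  let dp := (PySem.List.pyRange (n - 1) (-1) (-1)).foldl (pvOuterBody grid n m) dp
  PySem.List.pyGetD (PySem.List.pyGetD dp 0 []) 0 []

-- ===== PORT B =====
-- dfs(i, j) of Source B; i, j only ever take nonnegative values, so they are Nat here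
def pvDfs (grid : List (List Int)) (n m : Nat) (i j : Nat) : List (List (Int × Int)) :=
  if _h : n ≤ i ∨ m ≤ j then []
  else if i = n - 1 ∧ j = m - 1 then [[((n : Int) - 1, (m : Int) - 1)]]
  else if (grid.getD i []).getD j 0 = 0 then []
  else ((pvDfs grid n m (i + 1) j).map (fun p => ((i : Int), (j : Int)) :: p))
    ++ ((pvDfs grid n m i (j + 1)).map (fun p => ((i : Int), (j : Int)) :: p))
termination_by (n - i) + (m - j)
decreasing_by all_goals omega

def grid_robot_path_alt (grid : List (List Int)) : List (List (Int × Int)) :=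
  let n := grid.length
  let m := (grid.headD []).length   -- len(grid[0]); grid ≠ [] under Pre_
  pvDfs grid n m 0 0

-- ===== PRECONDITION & SPEC =====
-- Pre_ excludes exactly the inputs where A raises: the empty grid (len(grid[0]) is an
-- IndexError) and grids where some row A indexes is shorter than len(grid[0]) (the
-- destination cell (n-1, m-1) is never read, every other cell (i, j) with j < m is).
def Pre_grid_robot_path (grid : List (List Int)) : Prop :=
  grid ≠ [] ∧ ∀ i < grid.length, ∀ j < (grid.headD []).length,
    ¬(i = grid.length - 1 ∧ j = (grid.headD []).length - 1) → j < (grid.getD i []).length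

instance (grid : List (List Int)) : Decidable (Pre_grid_robot_path grid) := by
  unfold Pre_grid_robot_path; infer_instance

def pvWitness_grid_robot_path : List (List Int) := [[1, 1], [1, 0]]

def Spec_grid_robot_path (grid : List (List Int)) (out : List (List (Int × Int))) : Prop := out = grid_robot_path_alt grid
instance (grid : List (List Int)) (out : List (List (Int × Int))) : Decidable (Spec_grid_robot_path grid out) := by unfold Spec_grid_robot_path; infer_instance

-- ===== CLAIM (what is proved, stated in full; the proofs are below) =====
def Claim_equal_grid_robot_path : Prop := ∀ (grid : List (List Int)), Dom_grid_robot_path grid → Pre_grid_robot_path grid → Spec_grid_robot_path grid (grid_robot_path grid)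

-- ===== LEMMAS AND PROOFS =====

-- the canonical table: rows above i0 are done, row i0 is done from column j0 on
def pvTbl (grid : List (List Int)) (i0 j0 : Nat) : PvTab :=
  (List.range (grid.length + 1)).map (fun a =>
    (List.range ((grid.headD []).length + 1)).map (fun b =>
      if i0 < a ∨ (a = i0 ∧ j0 ≤ b) then pvDfs grid grid.length (grid.headD []).length a b else []))

lemma pvDfs_out (grid : List (List Int)) (n m i j : Nat) (h : n ≤ i ∨ m ≤ j) :
    pvDfs grid n m i j = [] := by
  rw [pvDfs]; simp [h]

lemma set_map_range {α : Type} (k i : Nat) (f : Nat → α) (v : α) (h : i < k) :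
    ((List.range k).map f).set i v = (List.range k).map (fun t => if t = i then v else f t) := by
  apply List.ext_getElem <;> simp
  intro a ha
  rcases eq_or_ne a i with rfl | hne
  · simp
  · simp [hne, Ne.symm hne]

lemma getD_map_range' {α : Type} (k i : Nat) (f : Nat → α) (d : α) (h : i < k) :
    ((List.range k).map f).getD i d = f i := by
  rw [List.getD_eq_getElem?_getD]
  simp [h]


lemma pvHead0 (grid : List (List Int)) : PySem.List.pyGetD grid 0 ([] : List Int) = grid.headD [] := by
  cases grid <;> simp [PySem.List.pyGetD_zero]

lemma pvTbl_row (grid : List (List Int)) (i0 j0 a : Nat) (ha : a < grid.length + 1) :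
    (pvTbl grid i0 j0).getD a [] = (List.range ((grid.headD []).length + 1)).map
      (fun b => if i0 < a ∨ (a = i0 ∧ j0 ≤ b) then pvDfs grid grid.length (grid.headD []).length a b else []) := by
  unfold pvTbl
  rw [getD_map_range' _ _ _ _ ha]

lemma pvTbl_entry (grid : List (List Int)) (i0 j0 a b : Nat) (ha : a < grid.length + 1)
    (hb : b < (grid.headD []).length + 1) :
    ((pvTbl grid i0 j0).getD a []).getD b [] =
      if i0 < a ∨ (a = i0 ∧ j0 ≤ b) then pvDfs grid grid.length (grid.headD []).length a b else [] := by
  rw [pvTbl_row grid i0 j0 a ha, getD_map_range' _ _ _ _ hb]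

lemma pvTbl_init (grid : List (List Int)) :
    (PySem.List.pyRange 0 ((grid.length : Int) + 1) 1).map
      (fun _ => List.replicate (((grid.headD []).length : Int) + 1).toNat ([] : List (List (Int × Int)))) =
    pvTbl grid grid.length 0 := by
  have h1 : ((grid.length : Int) + 1) = ((grid.length + 1 : Nat) : Int) := by push_cast; ring
  have h2 : (((grid.headD []).length : Int) + 1).toNat = (grid.headD []).length + 1 := by omega
  rw [h1, h2, PySem.List.pyRange_zero_nat, List.map_map]
  unfold pvTbl
  apply List.map_congr_left
  intro a ha
  simp only [List.mem_range] at ha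
  apply List.ext_getElem <;> simp
  intro b hb
  intro h
  exact pvDfs_out grid grid.length _ a b (by omega)

lemma pvTbl_shift (grid : List (List Int)) (i : Nat) (_hi : i < grid.length) :
    pvTbl grid (i + 1) 0 = pvTbl grid i (grid.headD []).length := by
  unfold pvTbl
  apply List.map_congr_left
  intro a ha
  apply List.map_congr_left
  intro b hb
  simp only [List.mem_range] at ha hb
  by_cases h1 : i + 1 < a ∨ (a = i + 1 ∧ 0 ≤ b)
  · rw [if_pos h1, if_pos (by omega)]
  · rw [if_neg h1]
    by_cases h2 : i < a ∨ (a = i ∧ (grid.headD []).length ≤ b)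
    · rw [if_pos h2]
      exact (pvDfs_out grid grid.length (grid.headD []).length a b (by omega)).symm
    · rw [if_neg h2]

lemma pvSet_tbl (grid : List (List Int)) (i j : Nat) (hi : i < grid.length)
    (hj : j < (grid.headD []).length) :
    (pvTbl grid i (j + 1)).set i (((pvTbl grid i (j + 1)).getD i []).set j
        (pvDfs grid grid.length (grid.headD []).length i j)) = pvTbl grid i j := by
  rw [pvTbl_row grid i (j + 1) i (by omega), set_map_range _ _ _ _ (by omega)]
  unfold pvTbl
  rw [set_map_range _ _ _ _ (by omega)]
  apply List.map_congr_left
  intro a ha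
  simp only [List.mem_range] at ha
  by_cases hai : a = i
  · subst hai
    rw [if_pos rfl]
    apply List.map_congr_left
    intro b hb
    simp only [List.mem_range] at hb
    by_cases hbj : b = j
    · subst hbj
      rw [if_pos rfl, if_pos (by omega)]
    · rw [if_neg hbj]
      by_cases hc : j + 1 ≤ b
      · rw [if_pos (by omega), if_pos (by omega)]
      · rw [if_neg (by omega), if_neg (by omega)]
  · rw [if_neg hai]
    apply List.map_congr_left
    intro b hb
    by_cases hc : i < a
    · rw [if_pos (by omega), if_pos (by omega)]
    · rw [if_neg (by omega), if_neg (by omega)]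

lemma pvInner_step (grid : List (List Int)) (i j : Nat) (hi : i < grid.length)
    (hj : j < (grid.headD []).length) :
    pvInnerBody grid (grid.length : Int) ((grid.headD []).length : Int) (i : Int)
      (pvTbl grid i (j + 1)) (j : Int) = pvTbl grid i j := by
  have e1 : PySem.List.pyGetD (PySem.List.pyGetD (pvTbl grid i (j + 1)) ((i : Int) + 1) []) (j : Int) []
      = pvDfs grid grid.length (grid.headD []).length (i + 1) j := by
    have hc : ((i : Int) + 1) = ((i + 1 : Nat) : Int) := by push_cast; ring
    rw [hc]
    simp only [PySem.List.pyGetD_natCast]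
    rw [pvTbl_entry grid i (j + 1) (i + 1) j (by omega) (by omega), if_pos (by omega)]
  have e2 : PySem.List.pyGetD (PySem.List.pyGetD (pvTbl grid i (j + 1)) (i : Int) []) ((j : Int) + 1) []
      = pvDfs grid grid.length (grid.headD []).length i (j + 1) := by
    have hc : ((j : Int) + 1) = ((j + 1 : Nat) : Int) := by push_cast; ring
    rw [hc]
    simp only [PySem.List.pyGetD_natCast]
    rw [pvTbl_entry grid i (j + 1) i (j + 1) (by omega) (by omega), if_pos (by omega)]
  have e3 : pvGCell grid (i : Int) (j : Int) = (grid.getD i []).getD j 0 := by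
    simp [pvGCell]
  simp only [pvInnerBody]
  rw [e1, e2]
  simp only [PySem.List.foldl_append_singleton_eq_map, List.nil_append]
  have hv : (if (i : Int) = (grid.length : Int) - 1 ∧ (j : Int) = ((grid.headD []).length : Int) - 1
      then [[((grid.length : Int) - 1, ((grid.headD []).length : Int) - 1)]]
      else if pvGCell grid (i : Int) (j : Int) = 0 then []
      else (pvDfs grid grid.length (grid.headD []).length (i + 1) j).map
            (fun p => ((i : Int), (j : Int)) :: p)
        ++ (pvDfs grid grid.length (grid.headD []).length i (j + 1)).map
            (fun p => ((i : Int), (j : Int)) :: p))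
      = pvDfs grid grid.length (grid.headD []).length i j := by
    conv_rhs => rw [pvDfs]
    rw [dif_neg (by omega)]
    by_cases hd : i = grid.length - 1 ∧ j = (grid.headD []).length - 1
    · rw [if_pos (by omega), if_pos hd]
    · rw [if_neg (by omega), if_neg hd, e3]
  rw [hv]
  simp only [PySem.List.pySetD_natCast, PySem.List.pyGetD_natCast]
  exact pvSet_tbl grid i j hi hj

lemma pvInner_fold (grid : List (List Int)) (i : Nat) (hi : i < grid.length) :
    ∀ k, k ≤ (grid.headD []).length →
    (PySem.List.pyRange ((k : Int) - 1) (-1) (-1)).foldl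
      (pvInnerBody grid (grid.length : Int) ((grid.headD []).length : Int) (i : Int))
      (pvTbl grid i k) = pvTbl grid i 0 := by
  intro k
  induction k with
  | zero =>
    intro _
    rw [PySem.List.pyRange_neg_one_eq_nil (by omega)]
    simp only [List.foldl_nil]
  | succ k ih =>
    intro hk
    have hcons : PySem.List.pyRange (((k + 1 : Nat) : Int) - 1) (-1) (-1)
        = (k : Int) :: PySem.List.pyRange ((k : Int) - 1) (-1) (-1) := by
      have hc : (((k + 1 : Nat) : Int) - 1) = (k : Int) := by push_cast; ring
      rw [hc, PySem.List.pyRange_neg_one_cons (by omega)]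
    rw [hcons]
    simp only [List.foldl_cons]
    rw [pvInner_step grid i k hi (by omega)]
    exact ih (by omega)

lemma pvOuter_step (grid : List (List Int)) (i : Nat) (hi : i < grid.length) :
    pvOuterBody grid (grid.length : Int) ((grid.headD []).length : Int)
      (pvTbl grid (i + 1) 0) (i : Int) = pvTbl grid i 0 := by
  unfold pvOuterBody
  rw [pvTbl_shift grid i hi]
  exact pvInner_fold grid i hi (grid.headD []).length le_rfl

lemma pvOuter_fold (grid : List (List Int)) :
    ∀ k, k ≤ grid.length →
    (PySem.List.pyRange ((k : Int) - 1) (-1) (-1)).foldl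
      (pvOuterBody grid (grid.length : Int) ((grid.headD []).length : Int))
      (pvTbl grid k 0) = pvTbl grid 0 0 := by
  intro k
  induction k with
  | zero =>
    intro _
    rw [PySem.List.pyRange_neg_one_eq_nil (by omega)]
    simp only [List.foldl_nil]
  | succ k ih =>
    intro hk
    have hcons : PySem.List.pyRange (((k + 1 : Nat) : Int) - 1) (-1) (-1)
        = (k : Int) :: PySem.List.pyRange ((k : Int) - 1) (-1) (-1) := by
      have hc : (((k + 1 : Nat) : Int) - 1) = (k : Int) := by push_cast; ring
      rw [hc, PySem.List.pyRange_neg_one_cons (by omega)]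
    rw [hcons]
    simp only [List.foldl_cons]
    rw [pvOuter_step grid k (by omega)]
    exact ih (by omega)

lemma pvRead (grid : List (List Int)) :
    PySem.List.pyGetD (PySem.List.pyGetD (pvTbl grid 0 0) 0 []) 0 [] =
      pvDfs grid grid.length (grid.headD []).length 0 0 := by
  simp only [PySem.List.pyGetD_zero]
  rw [pvTbl_entry grid 0 0 0 0 (by omega) (by omega), if_pos (by omega)]

theorem grid_robot_path_spec : Claim_equal_grid_robot_path := by
  intro grid _dom _pre
  unfold Spec_grid_robot_path grid_robot_path grid_robot_path_alt
  simp only [pvHead0]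
  rw [pvTbl_init, pvOuter_fold grid grid.length le_rfl]
  exact pvRead grid
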